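-- pv_equiv track=rewrite | github.com/hsinyun1005/GrammarGenie | demo.py | pos2gp
-- ===== SOURCE A (Python) =====
-- def pos2gp(pos_tag):
--     search_word = None
--     modified_words = []
--     flag = False
--     for word, tag in pos_tag:
--         if flag is False:
--             if tag in ['JJ', 'JJR', 'JJS']:
--                 search_word = word
--                 modified_words.append('ADJ')
--                 flag = True
--
--             if tag in ['VB', 'VBD', 'VBG', 'VBN', 'VBP', 'VBZ']:
--                 search_word = word
--                 modified_words.append('V')
--                 flag = True
--
--             if tag in ['NN', 'NNS', 'NNP', 'NNPS']:
--                 search_word = word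
--                 modified_words.append('N')
--                 flag = True
--         else:
--             modified_words.append(word)
--     return (search_word, ' '.join(modified_words))
-- ===== SOURCE B (Python) =====
-- ADJ_TAGS = {'JJ', 'JJR', 'JJS'}
-- V_TAGS = {'VB', 'VBD', 'VBG', 'VBN', 'VBP', 'VBZ'}
-- N_TAGS = {'NN', 'NNS', 'NNP', 'NNPS'}
--
--
-- def _label(tag):
--     if tag in ADJ_TAGS:
--         return 'ADJ'
--     if tag in V_TAGS:
--         return 'V'
--     if tag in N_TAGS:
--         return 'N'
--     return None
--
--
-- def pos2gp(pos_tag):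
--     tokens = list(pos_tag)
--     while tokens:
--         word, tag = tokens[0]
--         tokens = tokens[1:]
--         label = _label(tag)
--         if label is not None:
--             return (word, ' '.join([label] + [w for w, _ in tokens]))
--     return (None, '')
-- ===== Notes on version B (the rewrite author's own statement) =====
-- stated objective: simpler
-- what changed: B replaces A's mutable flag + accumulator-list loop (which keeps appending every later word and joins at the end) with an early-return scan: find the first ADJ/V/N-tagged token via a shared tag->label helper and immediately return its word with the label joined to the remaining words.
import Mathlib
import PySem

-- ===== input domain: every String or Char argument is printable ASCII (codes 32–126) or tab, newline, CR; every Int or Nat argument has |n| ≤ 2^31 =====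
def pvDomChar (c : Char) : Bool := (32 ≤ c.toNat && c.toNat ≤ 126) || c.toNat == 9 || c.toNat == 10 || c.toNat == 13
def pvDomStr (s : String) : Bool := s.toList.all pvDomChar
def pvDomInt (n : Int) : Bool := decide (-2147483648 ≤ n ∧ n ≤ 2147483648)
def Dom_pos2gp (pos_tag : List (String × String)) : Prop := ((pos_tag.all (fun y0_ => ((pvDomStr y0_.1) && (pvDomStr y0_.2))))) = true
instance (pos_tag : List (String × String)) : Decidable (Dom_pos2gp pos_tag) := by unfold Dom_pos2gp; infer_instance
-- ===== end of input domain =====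

-- B replaces A's flag/accumulator loop with an early-return scan that labels the first
-- ADJ/V/N-tagged token and joins the label with the remaining words (simpler decomposition).

-- ===== PORT A =====
-- one iteration of A's for-loop over the state (search_word, modified_words, flag)
def stepA (st : Option String × List String × Bool) (wt : String × String) :
    Option String × List String × Bool :=
  match st, wt with
  | (sw, mw, flag), (word, tag) =>
    if flag = false then
      let st1 := if tag ∈ ["JJ", "JJR", "JJS"] then (some word, mw ++ ["ADJ"], true)
                 else (sw, mw, flag)
      let st2 := if tag ∈ ["VB", "VBD", "VBG", "VBN", "VBP", "VBZ"] then
                   (some word, st1.2.1 ++ ["V"], true)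
                 else st1
      if tag ∈ ["NN", "NNS", "NNP", "NNPS"] then (some word, st2.2.1 ++ ["N"], true)
      else st2
    else (sw, mw ++ [word], flag)

def pos2gp (pos_tag : List (String × String)) : Option String × String :=
  let st := pos_tag.foldl stepA (none, [], false)
  (st.1, PySem.Str.join " " st.2.1)

-- ===== PORT B =====
-- B's _label: if-chain over the three tag sets
def tag2label (tag : String) : Option String :=
  if tag ∈ ["JJ", "JJR", "JJS"] then some "ADJ"
  else if tag ∈ ["VB", "VBD", "VBG", "VBN", "VBP", "VBZ"] then some "V"
  else if tag ∈ ["NN", "NNS", "NNP", "NNPS"] then some "N"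
  else none

-- B's while-loop: pop the head, return on the first labelled tag
def altGo : List (String × String) → Option String × String
  | [] => (none, "")
  | (word, tag) :: rest =>
    match tag2label tag with
    | some label => (some word, PySem.Str.join " " (label :: rest.map Prod.fst))
    | none => altGo rest

def pos2gp_alt (pos_tag : List (String × String)) : Option String × String :=
  altGo pos_tag

-- ===== PRECONDITION & SPEC =====
def Spec_pos2gp (pos_tag : List (String × String)) (out : Option String × String) : Prop := out = pos2gp_alt pos_tag
instance (pos_tag : List (String × String)) (out : Option String × String) : Decidable (Spec_pos2gp pos_tag out) := by unfold Spec_pos2gp; infer_instance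

-- ===== CLAIM (what is proved, stated in full; the proofs are below) =====
def Claim_equal_pos2gp : Prop := ∀ (pos_tag : List (String × String)), Dom_pos2gp pos_tag → Spec_pos2gp pos_tag (pos2gp pos_tag)

-- ===== LEMMAS AND PROOFS =====

-- ===== VERDICT (by name: the statement is the Claim_ definition above) =====
-- once flag is true, A's loop only appends the remaining words
theorem foldl_stepA_true (l : List (String × String)) (sw : Option String) (mw : List String) :
    l.foldl stepA (sw, mw, true) = (sw, mw ++ l.map Prod.fst, true) := by
  induction l generalizing mw with
  | nil => simp
  | cons hd tl ih =>
    obtain ⟨w, t⟩ := hd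
    simp [stepA, ih]

theorem pos2gp_eq_alt (l : List (String × String)) : pos2gp l = pos2gp_alt l := by
  induction l with
  | nil => simp [pos2gp, pos2gp_alt, altGo, PySem.Str.join]
  | cons hd tl ih =>
    obtain ⟨w, t⟩ := hd
    by_cases h1 : t ∈ ["JJ", "JJR", "JJS"]
    · have h2 : t ∉ ["VB", "VBD", "VBG", "VBN", "VBP", "VBZ"] := by
        simp at h1; rcases h1 with h | h | h <;> simp [h]
      have h3 : t ∉ ["NN", "NNS", "NNP", "NNPS"] := by
        simp at h1; rcases h1 with h | h | h <;> simp [h]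
      simp [pos2gp, pos2gp_alt, altGo, tag2label, stepA, h1, h2, h3, foldl_stepA_true]
    · by_cases h2 : t ∈ ["VB", "VBD", "VBG", "VBN", "VBP", "VBZ"]
      · have h3 : t ∉ ["NN", "NNS", "NNP", "NNPS"] := by
          simp at h2
          rcases h2 with h | h | h | h | h | h <;> simp [h]
        simp [pos2gp, pos2gp_alt, altGo, tag2label, stepA, h1, h2, h3, foldl_stepA_true]
      · by_cases h3 : t ∈ ["NN", "NNS", "NNP", "NNPS"]
        · simp [pos2gp, pos2gp_alt, altGo, tag2label, stepA, h1, h2, h3, foldl_stepA_true]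
        · simpa [pos2gp, pos2gp_alt, altGo, tag2label, stepA, h1, h2, h3] using ih

theorem pos2gp_spec : Claim_equal_pos2gp := by
  intro l _
  unfold Spec_pos2gp
  exact pos2gp_eq_alt l
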